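-- pv_equiv track=rewrite | github.com/GitMoshat/Cursor-Emulator | src/agent/screen_reader.py | _detect_question
-- ===== SOURCE A (Python) =====
-- def _detect_question(text: str) -> str:
--     """Find question in text."""
--     # Direct question mark
--     if '?' in text:
--         for sentence in text.split('\n'):
--             if '?' in sentence:
--                 return sentence.strip()
--
--     # Question keywords
--     q_keywords = ["What", "Which", "Who", "Are you", "Is it", "Do you"]
--     lower = text.lower()
--     for kw in q_keywords:
--         if kw.lower() in lower:
--             # Extract context around keyword
--             idx = lower.find(kw.lower())
--             start = max(0, text.rfind('\n', 0, idx) + 1)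
--             end = text.find('\n', idx)
--             if end == -1:
--                 end = len(text)
--             return text[start:end].strip()
--
--     return ""
-- ===== SOURCE B (Python) =====
-- def _detect_question(text: str) -> str:
--     """Find question in text."""
--     def line_at(idx):
--         # stripped line surrounding position idx
--         start = text.rfind('\n', 0, idx) + 1
--         end = text.find('\n', idx)
--         if end == -1:
--             end = len(text)
--         return text[start:end].strip()
--
--     idx = text.find('?')
--     if idx != -1:
--         return line_at(idx)
--
--     lower = text.lower()
--     for kw in ("what", "which", "who", "are you", "is it", "do you"):
--         j = lower.find(kw)
--         if j != -1:
--             return line_at(j)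
--     return ""
-- ===== Notes on version B (the rewrite author's own statement) =====
-- stated objective: simpler
-- what changed: Replaces A's split-the-text-into-lines-and-scan pass with direct index arithmetic: one shared helper extracts the stripped line around a character position via rfind/find of the newline separator, used both for the first question-mark hit (str.find) and for the first matching keyword.
import Mathlib
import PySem

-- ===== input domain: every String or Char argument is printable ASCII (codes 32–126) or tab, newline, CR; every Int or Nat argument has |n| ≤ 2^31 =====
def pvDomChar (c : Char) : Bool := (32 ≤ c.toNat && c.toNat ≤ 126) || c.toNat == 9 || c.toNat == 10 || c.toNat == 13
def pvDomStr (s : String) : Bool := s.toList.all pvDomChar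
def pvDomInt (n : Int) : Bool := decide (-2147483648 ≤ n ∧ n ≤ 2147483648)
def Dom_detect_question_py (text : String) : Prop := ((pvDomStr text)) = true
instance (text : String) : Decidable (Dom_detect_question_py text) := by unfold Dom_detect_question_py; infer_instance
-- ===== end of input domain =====

-- B replaces A's split-the-text-and-scan-lines pass by direct index arithmetic around the first
-- hit (rfind/find of the newline separator), sharing one line-extraction helper between both
-- phases (objective: simpler; the return value is proved equal on all inputs).

-- ===== PORT A =====
-- the loop "for sentence in text.split('\n'): if '?' in sentence: return sentence.strip()"
def aQLoop : List (List Char) → Option (List Char)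
  | [] => none
  | s :: rest => if PySem.Chars.isIn ['?'] s then some (PySem.Chars.strip s) else aQLoop rest

-- the keyword loop of A: "for kw in q_keywords: if kw.lower() in lower: … return text[start:end].strip()"
def aKw (cs lower : List Char) : List (List Char) → List Char
  | [] => []
  | kw :: rest =>
    if PySem.Chars.isIn (PySem.Chars.lower kw) lower then
      PySem.Chars.strip (PySem.Chars.slice cs
        (some (max 0 (PySem.Chars.rfindFrom cs ['\n'] 0 (some (PySem.Chars.find lower (PySem.Chars.lower kw))) + 1)))
        (some (if PySem.Chars.findFrom cs ['\n'] (PySem.Chars.find lower (PySem.Chars.lower kw)) none = -1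
               then (cs.length : Int)
               else PySem.Chars.findFrom cs ['\n'] (PySem.Chars.find lower (PySem.Chars.lower kw)) none)))
    else aKw cs lower rest

def aKeywords : List (List Char) :=
  ["What".toList, "Which".toList, "Who".toList, "Are you".toList, "Is it".toList, "Do you".toList]

def detect_question_py (text : String) : String :=
  match (if PySem.Chars.isIn ['?'] text.toList then aQLoop (PySem.Chars.splitOn text.toList ['\n']) else none) with
  | some s => String.ofList s
  | none => String.ofList (aKw text.toList (PySem.Chars.lower text.toList) aKeywords)

-- ===== PORT B =====
-- helper of B: the stripped line of the text surrounding character position idx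
def lineAt (cs : List Char) (idx : Int) : List Char :=
  PySem.Chars.strip (PySem.Chars.slice cs
    (some (PySem.Chars.rfindFrom cs ['\n'] 0 (some idx) + 1))
    (some (if PySem.Chars.findFrom cs ['\n'] idx none = -1 then (cs.length : Int)
           else PySem.Chars.findFrom cs ['\n'] idx none)))

def bKw (cs lower : List Char) : List (List Char) → List Char
  | [] => []
  | kw :: rest =>
    if PySem.Chars.find lower kw ≠ -1 then lineAt cs (PySem.Chars.find lower kw)
    else bKw cs lower rest

def bKeywords : List (List Char) :=
  ["what".toList, "which".toList, "who".toList, "are you".toList, "is it".toList, "do you".toList]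

def detect_question_py_alt (text : String) : String :=
  if PySem.Chars.find text.toList ['?'] ≠ -1 then
    String.ofList (lineAt text.toList (PySem.Chars.find text.toList ['?']))
  else String.ofList (bKw text.toList (PySem.Chars.lower text.toList) bKeywords)

-- ===== PRECONDITION & SPEC =====
def Spec_detect_question_py (text : String) (out : String) : Prop := out = detect_question_py_alt text
instance (text : String) (out : String) : Decidable (Spec_detect_question_py text out) := by unfold Spec_detect_question_py; infer_instance

-- ===== CLAIM (what is proved, stated in full; the proofs are below) =====
def Claim_equal_detect_question_py : Prop := ∀ (text : String), Dom_detect_question_py text → Spec_detect_question_py text (detect_question_py text)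

-- ===== LEMMAS AND PROOFS =====

lemma findgo_shift (c : Char) : ∀ (s : List Char) (k : Nat),
    PySem.Chars.find.go [c] s k =
      if PySem.Chars.find.go [c] s 0 = -1 then -1 else PySem.Chars.find.go [c] s 0 + k := by
  intro s
  induction s with
  | nil => intro k; simp [PySem.Chars.find.go]
  | cons x xs ih =>
    intro k
    rw [PySem.Chars.find.go]
    rw [show PySem.Chars.find.go [c] (x :: xs) 0
        = if [c].isPrefixOf (x::xs) then (0:Int) else PySem.Chars.find.go [c] xs 1 from by
      rw [PySem.Chars.find.go]; norm_num]
    by_cases hp : [c].isPrefixOf (x :: xs)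
    · simp [hp]
    · simp only [hp, Bool.false_eq_true, if_false]
      rw [ih (k+1), ih 1]
      have h1 : -1 ≤ PySem.Chars.find.go [c] xs 0 := PySem.Chars.neg_one_le_find xs [c]
      by_cases h0 : PySem.Chars.find.go [c] xs 0 = -1
      · simp [h0]
      · rw [if_neg h0, if_neg h0]
        split <;> push_cast <;> omega

lemma find_nil_single (c : Char) : PySem.Chars.find [] [c] = -1 := rfl

lemma find_cons_single (c x : Char) (xs : List Char) :
    PySem.Chars.find (x :: xs) [c] =
      if x = c then 0 else if PySem.Chars.find xs [c] = -1 then -1 else PySem.Chars.find xs [c] + 1 := by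
  show PySem.Chars.find.go [c] (x :: xs) 0 = _
  rw [PySem.Chars.find.go]
  have hp : [c].isPrefixOf (x :: xs) = (c == x) := by simp [List.isPrefixOf]
  rw [hp, findgo_shift]
  unfold PySem.Chars.find
  by_cases hxc : x = c
  · simp [hxc]
  · simp [hxc, Ne.symm hxc]

lemma find_single_ne_iff (c : Char) (l : List Char) :
    PySem.Chars.find l [c] ≠ -1 ↔ c ∈ l := by
  rw [PySem.Chars.find_ne_neg_one_iff, List.singleton_infix_iff]

lemma find_not_mem (c : Char) (l : List Char) (h : c ∉ l) : PySem.Chars.find l [c] = -1 := by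
  by_contra hne; exact h ((find_single_ne_iff c l).mp hne)

lemma find_mem_bounds (c : Char) (l : List Char) (h : c ∈ l) :
    0 ≤ PySem.Chars.find l [c] ∧ PySem.Chars.find l [c] < l.length := by
  induction l with
  | nil => cases h
  | cons x xs ih =>
    rw [find_cons_single]
    by_cases hx : x = c
    · simp [hx]
    · have hm : c ∈ xs := by cases h with | head => exact absurd rfl hx | tail _ h => exact h
      have := ih hm
      simp only [hx, if_false, List.length_cons]
      rw [if_neg (by omega)]
      push_cast; omega

lemma find_append_left (c : Char) (t u : List Char) (h : c ∈ t) :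
    PySem.Chars.find (t ++ u) [c] = PySem.Chars.find t [c] := by
  induction t with
  | nil => cases h
  | cons x xs ih =>
    rw [List.cons_append, find_cons_single, find_cons_single]
    by_cases hx : x = c
    · simp [hx]
    · have hm : c ∈ xs := by cases h with | head => exact absurd rfl hx | tail _ h => exact h
      have hb := find_mem_bounds c xs hm
      have hb2 := find_mem_bounds c (xs ++ u) (List.mem_append_left u hm)
      rw [ih hm, if_neg (by omega), if_neg (by omega)]

lemma find_append_not_mem (c : Char) (t u : List Char) (h : c ∉ t) :
    PySem.Chars.find (t ++ u) [c] =
      if PySem.Chars.find u [c] = -1 then -1 else t.length + PySem.Chars.find u [c] := by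
  induction t with
  | nil => simp
  | cons x xs ih =>
    have hx : ¬ x = c := fun e => h (e ▸ List.mem_cons_self)
    have hxs : c ∉ xs := fun m => h (List.mem_cons_of_mem x m)
    rw [List.cons_append, find_cons_single, if_neg hx, ih hxs]
    have hu := PySem.Chars.neg_one_le_find u [c]
    by_cases h0 : PySem.Chars.find u [c] = -1
    · simp [h0]
    · rw [if_neg h0, if_neg h0, if_neg (by omega)]
      simp only [List.length_cons]; omega

lemma rfindgo_succ (c x : Char) (xs : List Char) : ∀ (j : Nat),
    PySem.Chars.rfind.go (x :: xs) [c] (j + 1) =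
      if PySem.Chars.rfind.go xs [c] j = -1 then (if x = c then 0 else -1)
      else PySem.Chars.rfind.go xs [c] j + 1 := by
  intro j
  induction j with
  | zero =>
    rw [PySem.Chars.rfind.go, PySem.Chars.rfind.go, PySem.Chars.rfind.go]
    simp only [List.drop_succ_cons, List.drop_zero]
    have hp : [c].isPrefixOf (x :: xs) = (c == x) := by simp [List.isPrefixOf]
    by_cases h : [c].isPrefixOf xs
    · simp [h]
    · simp only [h, Bool.false_eq_true, if_false, hp]
      by_cases hxc : x = c
      · simp [hxc]
      · simp [hxc, Ne.symm hxc]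
  | succ j ih =>
    rw [PySem.Chars.rfind.go]
    rw [show PySem.Chars.rfind.go xs [c] (j + 1)
        = if [c].isPrefixOf (List.drop (j + 1) xs) then ((j:Int) + 1) else PySem.Chars.rfind.go xs [c] j from by
      rw [PySem.Chars.rfind.go]; push_cast; ring_nf]
    simp only [List.drop_succ_cons]
    by_cases h : [c].isPrefixOf (List.drop (j + 1) xs)
    · have hne : ¬ ((j:Int) + 1 = -1) := by omega
      simp only [h, if_true, if_neg hne]
      push_cast; ring
    · simp only [h, Bool.false_eq_true, if_false]
      exact ih

lemma rfind_nil_single (c : Char) : PySem.Chars.rfind [] [c] = -1 := rfl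

lemma rfind_cons_single (c x : Char) (xs : List Char) :
    PySem.Chars.rfind (x :: xs) [c] =
      if PySem.Chars.rfind xs [c] = -1 then (if x = c then 0 else -1)
      else PySem.Chars.rfind xs [c] + 1 := by
  show PySem.Chars.rfind.go (x :: xs) [c] (x :: xs).length = _
  rw [List.length_cons, rfindgo_succ]
  rfl

lemma neg_one_le_rfind_single (c : Char) (l : List Char) : -1 ≤ PySem.Chars.rfind l [c] := by
  induction l with
  | nil => rw [rfind_nil_single]
  | cons x xs ih =>
    rw [rfind_cons_single]
    split
    · split <;> omega
    · omega

lemma rfind_not_mem (c : Char) (l : List Char) (h : c ∉ l) : PySem.Chars.rfind l [c] = -1 := by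
  induction l with
  | nil => rfl
  | cons x xs ih =>
    have hx : ¬ x = c := fun e => h (e ▸ List.mem_cons_self)
    have hxs : c ∉ xs := fun m => h (List.mem_cons_of_mem x m)
    rw [rfind_cons_single, ih hxs, if_pos rfl, if_neg hx]

lemma rfind_append_cons (c : Char) (u v : List Char) :
    PySem.Chars.rfind (u ++ c :: v) [c] = u.length + 1 + PySem.Chars.rfind v [c] := by
  induction u with
  | nil =>
    rw [List.nil_append, rfind_cons_single]
    have := neg_one_le_rfind_single c v
    split
    · simp_all
    · simp; ring
  | cons x u' ih =>
    rw [List.cons_append, rfind_cons_single, ih]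
    have := neg_one_le_rfind_single c v
    rw [if_neg (by omega)]
    simp only [List.length_cons]; push_cast; ring

def splitRef (c : Char) : List Char → List (List Char)
  | [] => [[]]
  | x :: xs => if x = c then [] :: splitRef c xs else (splitRef c xs).modifyHead (x :: ·)

lemma splitgo_eq (c : Char) : ∀ (fuel : Nat) (l cur : List Char) (acc : List (List Char)),
    l.length ≤ fuel →
    PySem.Chars.splitOn.go [c] fuel l cur acc =
      acc.reverse ++ (splitRef c l).modifyHead (cur.reverse ++ ·) := by
  intro fuel
  induction fuel with
  | zero =>
    intro l cur acc hl
    have : l = [] := List.eq_nil_of_length_eq_zero (Nat.le_zero.mp hl)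
    subst this
    rw [PySem.Chars.splitOn.go]
    simp [splitRef]
  | succ fuel ih =>
    intro l cur acc hl
    cases l with
    | nil =>
      rw [PySem.Chars.splitOn.go]
      simp [splitRef]
      omega
    | cons x rest =>
      rw [PySem.Chars.splitOn.go]
      have hp : [c].isPrefixOf (x :: rest) = (c == x) := by simp [List.isPrefixOf]
      rw [hp]
      by_cases hxc : x = c
      · rw [if_pos (by simp [hxc])]
        rw [show List.drop [c].length (x :: rest) = rest from by simp]
        rw [ih rest [] (cur.reverse :: acc) (by simp at hl ⊢; omega)]
        rw [show splitRef c (x :: rest) = [] :: splitRef c rest from by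
          rw [splitRef, if_pos hxc]]
        simp
        rw [show (fun x : List Char => x) = id from rfl, List.modifyHead_id]
        rfl
      · rw [if_neg (by simp [Ne.symm hxc])]
        rw [ih rest (x :: cur) acc (by simp at hl ⊢; omega)]
        rw [show splitRef c (x :: rest) = (splitRef c rest).modifyHead (x :: ·) from by
          rw [splitRef, if_neg hxc]]
        rw [List.modifyHead_modifyHead]
        congr 2
        funext t
        simp

lemma splitOn_eq (c : Char) (l : List Char) : PySem.Chars.splitOn l [c] = splitRef c l := by
  unfold PySem.Chars.splitOn
  rw [splitgo_eq c (l.length + 1) l [] [] (by omega)]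
  simp only [List.reverse_nil, List.nil_append]
  rw [show (fun x : List Char => x) = id from rfl, List.modifyHead_id]
  rfl

lemma splitRef_not_mem (c : Char) (l : List Char) (h : c ∉ l) : splitRef c l = [l] := by
  induction l with
  | nil => rfl
  | cons x xs ih =>
    have hx : ¬ x = c := fun e => h (e ▸ List.mem_cons_self)
    have hxs : c ∉ xs := fun m => h (List.mem_cons_of_mem x m)
    rw [splitRef, if_neg hx, ih hxs]
    rfl

lemma splitRef_append_cons (c : Char) (t r : List Char) (h : c ∉ t) :
    splitRef c (t ++ c :: r) = t :: splitRef c r := by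
  induction t with
  | nil => simp [splitRef]
  | cons x t' ih =>
    have hx : ¬ x = c := fun e => h (e ▸ List.mem_cons_self)
    have ht' : c ∉ t' := fun m => h (List.mem_cons_of_mem x m)
    rw [List.cons_append, splitRef, if_neg hx, ih ht']
    rfl

lemma rfindFrom_zero_nat (l sub : List Char) (k : Nat) (hk : k ≤ l.length) :
    PySem.Chars.rfindFrom l sub 0 (some (k : Int)) = PySem.Chars.rfind (l.take k) sub := by
  simp only [PySem.Chars.rfindFrom]
  rw [show (if (l.length:Int) < (k:Int) then (l.length:Int)
      else if (k:Int) < 0 then if (k:Int) + (l.length:Int) < 0 then 0 else (k:Int) + (l.length:Int)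
      else (k:Int)) = (k:Int) from by split_ifs <;> omega]
  rw [show (if (0:Int) < 0 then if (0:Int) + (l.length:Int) < 0 then 0 else 0 + (l.length:Int) else 0) = (0:Int) from by
    split_ifs <;> omega]
  rw [if_neg (by omega)]
  simp only [Int.toNat_zero, Int.toNat_natCast, List.drop_zero]
  split
  · omega
  · omega

def lineStart (cs : List Char) (k : Nat) : Nat := (PySem.Chars.rfind (cs.take k) ['\n'] + 1).toNat

def lineEnd (cs : List Char) (k : Nat) : Nat :=
  if PySem.Chars.find (cs.drop k) ['\n'] = -1 then cs.length
  else k + (PySem.Chars.find (cs.drop k) ['\n']).toNat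

lemma lineAt_eq (cs : List Char) (k : Nat) (hk : k ≤ cs.length) :
    lineAt cs (k : Int) =
      PySem.Chars.strip (List.take (lineEnd cs k - lineStart cs k) (List.drop (lineStart cs k) cs)) := by
  have hS : PySem.Chars.rfind (cs.take k) ['\n'] + 1 = ((lineStart cs k : Nat) : Int) := by
    have := neg_one_le_rfind_single '\n' (cs.take k)
    unfold lineStart; omega
  have hf := PySem.Chars.neg_one_le_find (cs.drop k) ['\n']
  unfold lineAt
  rw [rfindFrom_zero_nat cs ['\n'] k hk, PySem.Chars.findFrom_natCast cs ['\n'] k hk]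
  by_cases h0 : PySem.Chars.find (cs.drop k) ['\n'] = -1
  · rw [show (cs.length : Int) = ((lineEnd cs k : Nat) : Int) from by unfold lineEnd; rw [if_pos h0]]
    norm_num [h0, hS]
    rw [PySem.List.slice_natCast]
  · have hne : ¬ ((k:Int) + PySem.Chars.find (cs.drop k) ['\n'] = -1) := by omega
    rw [show (k:Int) + PySem.Chars.find (cs.drop k) ['\n'] = ((lineEnd cs k : Nat) : Int) from by
      unfold lineEnd; rw [if_neg h0]; push_cast; omega] at hne ⊢
    norm_num [h0, hS, hne]
    rw [PySem.List.slice_natCast]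

lemma isIn_single_eq (c : Char) (l : List Char) :
    PySem.Chars.isIn [c] l = true ↔ c ∈ l := by
  rw [PySem.Chars.isIn_iff_infix, List.singleton_infix_iff]

lemma drop_shift (t r : List Char) (m : Nat) :
    (t ++ '\n' :: r).drop (t.length + 1 + m) = r.drop m := by
  rw [show t ++ '\n' :: r = (t ++ ['\n']) ++ r from by simp,
    show t.length + 1 + m = (t ++ ['\n']).length + m from by simp]
  rw [List.drop_append]
  simp

lemma take_shift (t r : List Char) (m : Nat) :
    (t ++ '\n' :: r).take (t.length + 1 + m) = t ++ '\n' :: r.take m := by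
  rw [show t ++ '\n' :: r = (t ++ ['\n']) ++ r from by simp,
    show t.length + 1 + m = (t ++ ['\n']).length + m from by simp]
  rw [List.take_append, List.take_of_length_le (by simp)]
  simp

lemma master_append (t r : List Char) (htn : '\n' ∉ t)
    (ihr : PySem.Chars.find r ['?'] ≠ -1 →
      aQLoop (PySem.Chars.splitOn r ['\n']) = some (lineAt r (PySem.Chars.find r ['?'])))
    (hq : PySem.Chars.find (t ++ '\n' :: r) ['?'] ≠ -1) :
    aQLoop (splitRef '\n' (t ++ '\n' :: r)) =
      some (lineAt (t ++ '\n' :: r) (PySem.Chars.find (t ++ '\n' :: r) ['?'])) := by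
  rw [splitRef_append_cons '\n' t r htn]
  show (if PySem.Chars.isIn ['?'] t then some (PySem.Chars.strip t) else aQLoop (splitRef '\n' r)) = _
  by_cases hqt : '?' ∈ t
  · rw [if_pos ((isIn_single_eq '?' t).mpr hqt)]
    have hft := find_mem_bounds '?' t hqt
    rw [find_append_left '?' t _ hqt]
    have hki : PySem.Chars.find t ['?'] = (((PySem.Chars.find t ['?']).toNat : Nat) : Int) := by omega
    set k := (PySem.Chars.find t ['?']).toNat with hk
    have hkt : k < t.length := by omega
    rw [hki, lineAt_eq _ k (by simp [List.length_append]; omega)]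
    have hS : lineStart (t ++ '\n' :: r) k = 0 := by
      unfold lineStart
      rw [List.take_append_of_le_length (by omega)]
      rw [rfind_not_mem '\n' _ (fun hm => htn (List.mem_of_mem_take hm))]
      decide
    have hfind : PySem.Chars.find (t.drop k ++ '\n' :: r) ['\n'] = ((t.length - k : Nat) : Int) := by
      rw [find_append_not_mem '\n' _ _ (fun hm => htn (List.mem_of_mem_drop hm))]
      rw [find_cons_single, if_pos rfl]
      rw [if_neg (by omega)]
      simp [List.length_drop]
    have hE : lineEnd (t ++ '\n' :: r) k = t.length := by
      unfold lineEnd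
      rw [List.drop_append_of_le_length (by omega), hfind, if_neg (by omega)]
      omega
    rw [hS, hE]
    simp only [Nat.sub_zero, List.drop_zero]
    rw [List.take_append_of_le_length le_rfl, List.take_length]
  · rw [if_neg (fun h => hqt ((isIn_single_eq '?' t).mp h))]
    have hqr : '?' ∈ r := by
      have hm : '?' ∈ t ++ '\n' :: r := (find_single_ne_iff '?' _).mp hq
      rcases List.mem_append.mp hm with h | h
      · exact absurd h hqt
      · rcases List.mem_cons.mp h with h | h
        · exact absurd h (by decide)
        · exact h
    have hfr := find_mem_bounds '?' r hqr
    have hfrne : PySem.Chars.find r ['?'] ≠ -1 := (find_single_ne_iff '?' r).mpr hqr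
    rw [← splitOn_eq, ihr hfrne]
    set k' := (PySem.Chars.find r ['?']).toNat with hk'
    have h1 : PySem.Chars.find ('\n' :: r) ['?'] = PySem.Chars.find r ['?'] + 1 := by
      rw [find_cons_single, if_neg (by decide), if_neg hfrne]
    have hfi : PySem.Chars.find (t ++ '\n' :: r) ['?'] = ((t.length + 1 + k' : Nat) : Int) := by
      rw [find_append_not_mem '?' t _ hqt, h1, if_neg (by omega)]
      push_cast; omega
    rw [hfi, lineAt_eq _ (t.length + 1 + k') (by simp [List.length_append]; omega)]
    rw [show PySem.Chars.find r ['?'] = ((k' : Nat) : Int) from by omega,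
      lineAt_eq r k' (by omega)]
    have hS : lineStart (t ++ '\n' :: r) (t.length + 1 + k') = t.length + 1 + lineStart r k' := by
      unfold lineStart
      rw [take_shift, rfind_append_cons]
      have := neg_one_le_rfind_single '\n' (r.take k')
      omega
    have hE : lineEnd (t ++ '\n' :: r) (t.length + 1 + k') = t.length + 1 + lineEnd r k' := by
      unfold lineEnd
      rw [drop_shift]
      by_cases hf : PySem.Chars.find (r.drop k') ['\n'] = -1
      · rw [if_pos hf, if_pos hf]
        simp [List.length_append]
        omega
      · rw [if_neg hf, if_neg hf]
        omega
    rw [hS, hE]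
    rw [show t.length + 1 + lineEnd r k' - (t.length + 1 + lineStart r k') = lineEnd r k' - lineStart r k' from by omega]
    rw [drop_shift]

lemma master (n : Nat) : ∀ (cs : List Char), cs.length ≤ n → PySem.Chars.find cs ['?'] ≠ -1 →
    aQLoop (PySem.Chars.splitOn cs ['\n']) = some (lineAt cs (PySem.Chars.find cs ['?'])) := by
  induction n with
  | zero =>
    intro cs hlen hq
    have : cs = [] := List.eq_nil_of_length_eq_zero (Nat.le_zero.mp hlen)
    subst this
    exact absurd (find_nil_single '?') hq
  | succ n ih =>
    intro cs hlen hq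
    have hqm : '?' ∈ cs := (find_single_ne_iff '?' cs).mp hq
    have hb := find_mem_bounds '?' cs hqm
    rw [splitOn_eq]
    by_cases hnl : '\n' ∈ cs
    · -- cs = t ++ '\n' :: r
      have hd : cs.dropWhile (· != '\n') ≠ [] := by
        intro h0
        have : cs.takeWhile (· != '\n') = cs := by
          have := List.takeWhile_append_dropWhile (p := (· != '\n')) (l := cs)
          rw [h0, List.append_nil] at this; exact this
        have := List.mem_takeWhile_imp (this ▸ hnl)
        simp at this
      set t := cs.takeWhile (· != '\n') with ht
      have htn : '\n' ∉ t := by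
        intro hm
        have := List.mem_takeWhile_imp hm
        simp at this
      have hhead : (cs.dropWhile (· != '\n')).head hd = ('\n' : Char) := by
        have := List.head_dropWhile_not (· != '\n') hd
        simpa using this
      set r := (cs.dropWhile (· != '\n')).tail with hr
      have hcs : cs = t ++ '\n' :: r := by
        conv_lhs => rw [← List.takeWhile_append_dropWhile (p := (· != '\n')) (l := cs)]
        congr 1
        have h2 := (List.cons_head_tail hd).symm
        rw [hhead] at h2
        rw [hr]
        exact h2
      rw [hcs] at hq ⊢
      exact master_append t r htn
        (fun h => ih r (by rw [hcs] at hlen; simp [List.length_append] at hlen; omega) h) hq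
    · rw [splitRef_not_mem '\n' cs hnl]
      show (if PySem.Chars.isIn ['?'] cs then some (PySem.Chars.strip cs) else aQLoop []) = _
      rw [if_pos ((isIn_single_eq '?' cs).mpr hqm)]
      rw [show PySem.Chars.find cs ['?'] = (((PySem.Chars.find cs ['?']).toNat : Nat) : Int) from by omega]
      rw [lineAt_eq cs (PySem.Chars.find cs ['?']).toNat (by omega)]
      have hS : lineStart cs (PySem.Chars.find cs ['?']).toNat = 0 := by
        unfold lineStart
        rw [rfind_not_mem '\n' _ (fun hm => hnl (List.mem_of_mem_take hm))]
        decide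
      have hE : lineEnd cs (PySem.Chars.find cs ['?']).toNat = cs.length := by
        unfold lineEnd
        rw [if_pos (find_not_mem '\n' _ (fun hm => hnl (List.mem_of_mem_drop hm)))]
      rw [hS, hE]
      simp

lemma kw_lemma (cs low : List Char) (hlen : low.length = cs.length) :
    ∀ (kws : List (List Char)), aKw cs low kws = bKw cs low (kws.map PySem.Chars.lower) := by
  intro kws
  induction kws with
  | nil => rfl
  | cons kw rest ih =>
    rw [List.map_cons, aKw, bKw]
    by_cases h : PySem.Chars.find low (PySem.Chars.lower kw) = -1
    · rw [if_neg (by simp [PySem.Chars.isIn, h]), if_neg (by simp [h]), ih]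
    · have hA : PySem.Chars.isIn (PySem.Chars.lower kw) low = true := by
        simp [PySem.Chars.isIn, h]
      rw [if_pos hA, if_pos h]
      have h0 := PySem.Chars.neg_one_le_find low (PySem.Chars.lower kw)
      have hle := PySem.Chars.find_le_length low (PySem.Chars.lower kw)
      have hcast : PySem.Chars.find low (PySem.Chars.lower kw)
          = (((PySem.Chars.find low (PySem.Chars.lower kw)).toNat : Nat) : Int) := by omega
      unfold lineAt
      rw [hcast, rfindFrom_zero_nat cs ['\n'] _ (by omega)]
      have := neg_one_le_rfind_single '\n' (cs.take (PySem.Chars.find low (PySem.Chars.lower kw)).toNat)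
      rw [max_eq_right (by omega)]

lemma bKeywords_eq : bKeywords = aKeywords.map PySem.Chars.lower := by decide

-- ===== VERDICT (by name: the statement is the Claim_ definition above) =====
theorem detect_question_py_spec : Claim_equal_detect_question_py := by
  intro text _
  unfold Spec_detect_question_py detect_question_py detect_question_py_alt
  by_cases h : PySem.Chars.find text.toList ['?'] = -1
  · simp only [PySem.Chars.isIn, h, bne_self_eq_false, Bool.false_eq_true, if_false, ne_eq,
      not_true_eq_false]
    rw [bKeywords_eq, ← kw_lemma text.toList (PySem.Chars.lower text.toList)
      (by simp [PySem.Chars.lower])]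
  · have hIn : PySem.Chars.isIn ['?'] text.toList = true := by
      simp [PySem.Chars.isIn, bne_iff_ne, h]
    rw [hIn]
    simp only [if_true]
    rw [master text.toList.length text.toList le_rfl h]
    simp [h]
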